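-- pv_equiv track=rewrite | github.com/macobo/python-grader | tasks/MTAT.100/2013/Midterm_1/KT2_R8_mood_solution.py | mood
-- ===== SOURCE A (Python) =====
-- def mood(l):
-- 	elemendid = list(set(l))
-- 	elemendid.sort()
-- 	moodsaid = 0
-- 	for elem in elemendid:
-- 		kogus = l.count(elem)
-- 		if kogus > moodsaid:
-- 			moodsaim = elem
-- 			moodsaid = kogus
-- 	return moodsaim
-- ===== SOURCE B (Python) =====
-- def mood(l):
--     s = sorted(l)
--     n = len(s)
--     best = 0
--     i = 0
--     while i < n:
--         j = i
--         while j < n and s[j] == s[i]: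
--             j += 1
--         if j - i > best:
--             best = j - i
--             result = s[i]
--         i = j
--     return result
-- ===== Notes on version B (the rewrite author's own statement) =====
-- stated objective: faster
-- what changed: Replaces sorting the distinct elements and re-scanning the whole list with l.count for each of them by a single sort of l followed by one run-length scan; strict '>' keeps the smallest-mode tie-break.
import Mathlib
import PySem

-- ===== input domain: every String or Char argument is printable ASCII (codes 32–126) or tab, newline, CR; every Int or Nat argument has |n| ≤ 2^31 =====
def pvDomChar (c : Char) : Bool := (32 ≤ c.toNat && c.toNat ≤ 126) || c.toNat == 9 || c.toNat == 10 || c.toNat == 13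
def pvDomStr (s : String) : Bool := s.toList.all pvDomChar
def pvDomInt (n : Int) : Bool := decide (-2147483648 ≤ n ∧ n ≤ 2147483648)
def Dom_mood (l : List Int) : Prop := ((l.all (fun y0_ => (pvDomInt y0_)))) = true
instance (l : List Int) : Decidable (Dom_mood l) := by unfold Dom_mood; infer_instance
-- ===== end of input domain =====

-- B sorts the list once and finds the mode by a single run-length scan instead of
-- sorting the distinct elements and counting each with l.count; both Pythons raise on [], excluded by Pre_.


-- ===== PORT A =====
def mood (l : List Int) : Int :=
  let elemendid := PySem.List.sorted (PySem.Set.ofList l) (fun x => x)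
  let r := elemendid.foldl
    (fun (st : Int × Option Int) elem =>
      let kogus : Int := (PySem.List.count l elem : Int)
      if kogus > st.1 then (kogus, some elem) else st)
    ((0 : Int), (none : Option Int))
  r.2.getD 0   -- 'none' (moodsaim unassigned, UnboundLocalError) is only reached on l = [], outside Pre_

-- ===== PORT B =====
-- the outer while loop of Source B; one step consumes the inner while loop's run of the head element
def moodRun : List Int → Int → Option Int → Option Int
  | [], _, res => res
  | x :: rest, best, res =>
    let run : Int := 1 + (rest.takeWhile (fun y => y == x)).length
    let rest' := rest.dropWhile (fun y => y == x)
    if run > best then moodRun rest' run (some x) else moodRun rest' best res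
termination_by s _ _ => s.length
decreasing_by all_goals simp only [List.length_cons]; exact Nat.lt_succ_of_le (List.length_dropWhile_le _ _)

def mood_alt (l : List Int) : Int :=
  (moodRun (PySem.List.sorted l (fun x => x)) 0 none).getD 0   -- 'none' only on l = [], outside Pre_

-- ===== PRECONDITION & SPEC =====
-- Pre_ excludes exactly the empty list, on which the Python A raises UnboundLocalError.
def Pre_mood (l : List Int) : Prop := l ≠ []
instance (l : List Int) : Decidable (Pre_mood l) := by unfold Pre_mood; infer_instance
def pvWitness_mood : List Int := [3, 1, 3]

def Spec_mood (l : List Int) (out : Int) : Prop := out = mood_alt l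
instance (l : List Int) (out : Int) : Decidable (Spec_mood l out) := by unfold Spec_mood; infer_instance

-- ===== CLAIM (what is proved, stated in full; the proofs are below) =====
def Claim_equal_mood : Prop := ∀ (l : List Int), Dom_mood l → Pre_mood l → Spec_mood l (mood l)

-- ===== LEMMAS AND PROOFS =====

-- the body of A's fold, with the list used for counting made a parameter
def gFold (m : List Int) (st : Int × Option Int) (e : Int) : Int × Option Int :=
  if ((PySem.List.count m e : Int)) > st.1 then ((PySem.List.count m e : Int), some e) else st

-- key lemma: on a ≤-sorted list s, B's run-length scan equals A's fold over any
-- <-sorted list d holding exactly the elements of s, with counts taken in s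
lemma moodRun_eq : ∀ (n : Nat) (s : List Int), s.length ≤ n → s.Pairwise (· ≤ ·) →
    ∀ (d : List Int), d.Pairwise (· < ·) → (∀ e, e ∈ d ↔ e ∈ s) →
    ∀ (best : Int) (res : Option Int),
      moodRun s best res = (d.foldl (gFold s) (best, res)).2 := by
  intro n
  induction n with
  | zero =>
    intro s hlen _ d _ hmem best res
    have hs : s = [] := List.eq_nil_of_length_eq_zero (Nat.le_zero.mp hlen)
    subst hs
    have hd : d = [] := List.eq_nil_iff_forall_not_mem.mpr (fun e he => by
      simpa using (hmem e).mp he)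
    subst hd
    simp [moodRun]
  | succ n ih =>
    intro s hlen hs d hd hmem best res
    match s, hs with
    | [], _ =>
      have hd : d = [] := List.eq_nil_iff_forall_not_mem.mpr (fun e he => by
        simpa using (hmem e).mp he)
      subst hd
      simp [moodRun]
    | x :: rest, hs =>
      have hx : ∀ y ∈ rest, x ≤ y := (List.pairwise_cons.mp hs).1
      have hrest : rest.Pairwise (· ≤ ·) := (List.pairwise_cons.mp hs).2
      set t := rest.takeWhile (fun y => y == x) with ht
      set r' := rest.dropWhile (fun y => y == x) with hr'
      have hsplit : t ++ r' = rest := List.takeWhile_append_dropWhile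
      have htx : ∀ y ∈ t, y = x := fun y hy => by
        have := List.mem_takeWhile_imp hy
        simpa using this
      have hr'pair : r'.Pairwise (· ≤ ·) := hrest.sublist (List.dropWhile_sublist _)
      -- every element of r' is strictly greater than x
      have hxr' : ∀ z ∈ r', x < z := by
        cases hcase : r' with
        | nil => intro z hz; simp at hz
        | cons y0 tl =>
          have hy0 : (y0 == x) = false := by
            have := List.head?_dropWhile_not (fun y => y == x) rest
            rw [← hr', hcase] at this
            simpa using this
          have hy0x : x < y0 := by
            have hmemy0 : y0 ∈ rest := (List.dropWhile_sublist _).mem (by rw [← hr', hcase]; simp)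
            have : x ≤ y0 := hx y0 hmemy0
            have hne : y0 ≠ x := by simpa using hy0
            omega
          intro z hz
          rcases List.mem_cons.mp hz with h | h
          · omega
          · have : y0 ≤ z := by
              have := hr'pair
              rw [hcase] at this
              exact (List.pairwise_cons.mp this).1 z h
            omega
      -- membership in s decomposes as = x or ∈ r'
      have hmem_s : ∀ z, z ∈ x :: rest ↔ z = x ∨ z ∈ r' := by
        intro z
        constructor
        · intro hz
          rcases List.mem_cons.mp hz with h | h
          · exact Or.inl h
          · rw [← hsplit] at h
            rcases List.mem_append.mp h with h | h
            · exact Or.inl (htx z h)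
            · exact Or.inr h
        · intro hz
          rcases hz with h | h
          · simp [h]
          · have : z ∈ rest := by rw [← hsplit]; exact List.mem_append.mpr (Or.inr h)
            exact List.mem_cons.mpr (Or.inr this)
      -- counts in s
      have hcount_t : ∀ z, z ≠ x → List.count z t = 0 := fun z hz =>
        List.count_eq_zero.mpr (fun h => hz (htx z h))
      have hcount_r'_x : List.count x r' = 0 :=
        List.count_eq_zero.mpr (fun h => absurd (hxr' x h) (lt_irrefl x))
      have hcount_ne : ∀ z, z ≠ x → List.count z (x :: rest) = List.count z r' := by
        intro z hz
        rw [List.count_cons, ← hsplit, List.count_append, hcount_t z hz]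
        simp [Ne.symm hz]
      have hcount_x : List.count x (x :: rest) = t.length + 1 := by
        rw [List.count_cons, ← hsplit, List.count_append, hcount_r'_x]
        have : List.count x t = t.length := List.count_eq_length.mpr (fun y hy => by
          simp [htx y hy])
        simp [this]
      -- d = x :: d'
      obtain ⟨d', hdcons⟩ : ∃ d', d = x :: d' := by
        have hxd : x ∈ d := (hmem x).mpr (by simp)
        match d, hd with
        | [], _ => simp at hxd
        | e :: d', hd =>
          have hed : e = x := by
            have hes : e ∈ x :: rest := (hmem e).mp (by simp)
            have hxe : x ≤ e := by
              rcases (hmem_s e).mp hes with h | h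
              · omega
              · exact le_of_lt (hxr' e h)
            rcases List.mem_cons.mp hxd with h | h
            · omega
            · have : e < x := (List.pairwise_cons.mp hd).1 x h
              omega
          exact ⟨d', by rw [hed]⟩
      subst hdcons
      have hd' : d'.Pairwise (· < ·) := (List.pairwise_cons.mp hd).2
      have hxd' : ∀ z ∈ d', x < z := (List.pairwise_cons.mp hd).1
      have hmem' : ∀ e, e ∈ d' ↔ e ∈ r' := by
        intro e
        constructor
        · intro he
          have hes := (hmem e).mp (List.mem_cons.mpr (Or.inr he))
          rcases (hmem_s e).mp hes with h | h
          · exact absurd h (by have := hxd' e he; omega)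
          · exact h
        · intro he
          have hed : e ∈ x :: d' := (hmem e).mpr ((hmem_s e).mpr (Or.inr he))
          rcases List.mem_cons.mp hed with h | h
          · exact absurd h (by have := hxr' e he; omega)
          · exact h
      -- the run length is the count of x in s
      have hrun : ((PySem.List.count (x :: rest) x : Int)) = 1 + (t.length : Int) := by
        rw [PySem.List.count_eq, hcount_x]; push_cast; ring
      -- gFold s and gFold r' agree on the elements of d'
      have hcongr : ∀ (acc : Int × Option Int), ∀ z ∈ d',
          gFold (x :: rest) acc z = gFold r' acc z := by
        intro acc z hz
        have hzx : z ≠ x := by have := hxd' z hz; omega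
        unfold gFold
        rw [PySem.List.count_eq, PySem.List.count_eq, hcount_ne z hzx]
      have hlen' : r'.length ≤ n := by
        have h1 : r'.length ≤ rest.length := List.length_dropWhile_le _ _
        simp at hlen; omega
      -- unfold one step of moodRun and one step of the fold
      rw [moodRun]
      simp only [List.foldl_cons]
      have hstep : gFold (x :: rest) (best, res) x =
          if 1 + (t.length : Int) > best then (1 + (t.length : Int), some x) else (best, res) := by
        unfold gFold; rw [hrun]
      rw [hstep]
      split
      · rw [ih r' hlen' hr'pair d' hd' hmem' _ _,
          PySem.List.foldl_congr_mem d' (gFold (x :: rest)) (gFold r') _ hcongr]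
      · rw [ih r' hlen' hr'pair d' hd' hmem' _ _,
          PySem.List.foldl_congr_mem d' (gFold (x :: rest)) (gFold r') _ hcongr]

-- counting in l and in sorted(l) is the same
lemma count_sorted (l : List Int) (z : Int) :
    PySem.List.count (PySem.List.sorted l (fun x => x)) z = PySem.List.count l z := by
  rw [PySem.List.count_eq, PySem.List.count_eq]
  exact (PySem.List.sorted_perm l (fun x => x) false).count_eq z

-- ===== VERDICT (by name: the statement is the Claim_ definition above) =====
theorem mood_spec : Claim_equal_mood := by
  intro l _ _
  unfold Spec_mood mood mood_alt
  have hmain := moodRun_eq (PySem.List.sorted l (fun x => x)).length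
    (PySem.List.sorted l (fun x => x)) le_rfl
    (PySem.List.sorted_pairwise l (fun x => x))
    (PySem.List.sorted (PySem.Set.ofList l) (fun x => x))
    (PySem.List.sorted_ofList_pairwise_lt l)
    (fun e => by
      rw [PySem.List.mem_sorted, PySem.Set.mem_ofList, PySem.List.mem_sorted])
    0 none
  rw [hmain]
  have hcongr : ∀ (acc : Int × Option Int),
      ∀ z ∈ PySem.List.sorted (PySem.Set.ofList l) (fun x => x),
      gFold (PySem.List.sorted l (fun x => x)) acc z = gFold l acc z := by
    intro acc z _
    unfold gFold
    rw [count_sorted]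
  rw [PySem.List.foldl_congr_mem _ _ (gFold l) _ hcongr]
  rfl
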